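-- pv_equiv track=rewrite | github.com/the-JS-hater/TDDD95 | LAB1/lab3/str_match.py | str_match
-- ===== SOURCE A (Python) =====
-- def str_match(s, t):
--     P = 53
--     M = 2**32
--     s_size = len(s)
--     t_size = len(t)
--     occs = []
--
--     p_pow = [1] * max(s_size, t_size)
--     for i in range(1, len(p_pow)):
--         p_pow[i] = (p_pow[i-1] * P) % M
--
--     h = [0] * (t_size + 1)
--     for i,c in enumerate(t):
--         h[i+1] = (h[i] + (ord(c) - ord('a') + 1) * p_pow[i]) % M
--     h_s = 0
--     for i, c in enumerate(s):
--         h_s = (h_s + (ord(c) - ord('a') + 1) * p_pow[i]) % M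
--
--     for i in range(t_size - s_size + 1):
--         cur_h = (h[i+s_size] + M - h[i]) % M
--         if cur_h == h_s * p_pow[i] % M: occs += [i]
--
--     return occs;
-- ===== SOURCE B (Python) =====
-- def str_match(s, t):
--     # Rolling-window hash: one scaled window hash rolled across t instead of a
--     # precomputed prefix-hash array; same P, M and char codes as A, so every
--     # hash comparison (including collisions) is bit-for-bit identical.
--     P = 53
--     M = 2 ** 32
--     m, n = len(s), len(t)
--     if m > n:
--         return []
--     W = 0      # window hash: sum of (ord(t[i+j])-96) * P^(i+j) mod M
--     Hp = 0     # pattern hash scaled by P^i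
--     high = 1   # P^j while building, then P^(i+m) mod M
--     for j in range(m):
--         W = (W + (ord(t[j]) - 96) * high) % M
--         Hp = (Hp + (ord(s[j]) - 96) * high) % M
--         high = high * P % M
--     low = 1    # P^i mod M
--     occs = []
--     for i in range(n - m + 1):
--         if W == Hp:
--             occs.append(i)
--         if i + m < n:
--             W = (W - (ord(t[i]) - 96) * low + (ord(t[i + m]) - 96) * high) % M
--             Hp = Hp * P % M
--             high = high * P % M
--             low = low * P % M
--     return occs
-- ===== Notes on version B (the rewrite author's own statement) =====
-- stated objective: simpler
-- what changed: B drops A's precomputed power array and prefix-hash array and instead rolls a single scaled window hash (and a scaled pattern hash) across the text, using the same P, M and character codes so every hash comparison, including collisions, is identical.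
import Mathlib
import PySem

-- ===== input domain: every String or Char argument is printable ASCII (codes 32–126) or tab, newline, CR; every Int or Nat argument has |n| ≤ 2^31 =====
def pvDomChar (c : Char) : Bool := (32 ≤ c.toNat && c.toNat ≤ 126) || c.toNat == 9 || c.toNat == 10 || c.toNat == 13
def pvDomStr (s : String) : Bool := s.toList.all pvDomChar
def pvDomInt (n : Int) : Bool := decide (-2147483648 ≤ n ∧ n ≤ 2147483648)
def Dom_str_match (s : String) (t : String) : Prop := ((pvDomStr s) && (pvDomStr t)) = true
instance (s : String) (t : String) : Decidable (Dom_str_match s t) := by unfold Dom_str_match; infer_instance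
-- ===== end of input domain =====

-- B replaces A's precomputed prefix-hash and power arrays by a single rolling window
-- hash (same P, M and char codes, so every hash comparison is identical); objective: simpler.

-- ===== PORT A =====
def pvM : Int := 4294967296   -- 2**32

def pvCode (c : Char) : Int := (c.toNat : Int) - 96   -- ord(c) - ord('a') + 1

-- p_pow build loop: p_pow[i] = (p_pow[i-1] * P) % M, carrying the previous cell
def pvPowGo (prev : Int) : Nat → List Int
  | 0 => []
  | k+1 => prev :: pvPowGo (PySem.Int.mod (prev * 53) pvM) k

-- h build loop over enumerate(t): h[i+1] = (h[i] + code(c) * p_pow[i]) % M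
def pvHGo (p_pow : List Int) (cur : Int) (i : Nat) : List Char → List Int
  | [] => [cur]
  | c :: cs => cur :: pvHGo p_pow (PySem.Int.mod (cur + pvCode c * p_pow.getD i 0) pvM) (i+1) cs

-- h_s loop over enumerate(s)
def pvHsGo (p_pow : List Int) (acc : Int) (i : Nat) : List Char → Int
  | [] => acc
  | c :: cs => pvHsGo p_pow (PySem.Int.mod (acc + pvCode c * p_pow.getD i 0) pvM) (i+1) cs

def str_match (s : String) (t : String) : List Int :=
  let sc := s.toList
  let tc := t.toList
  let s_size := sc.length
  let t_size := tc.length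
  let p_pow := pvPowGo 1 (max s_size t_size)
  let h := pvHGo p_pow 0 0 tc
  let h_s := pvHsGo p_pow 0 0 sc
  -- final scan; list indexing via getD: in range on every input Pre_ admits (s nonempty)
  (PySem.List.pyRange 0 ((t_size : Int) - (s_size : Int) + 1) 1).foldl
    (fun occs i =>
      let cur_h := PySem.Int.mod (h.getD (i.toNat + s_size) 0 + pvM - h.getD i.toNat 0) pvM
      if cur_h == PySem.Int.mod (h_s * (p_pow.getD i.toNat 0)) pvM then occs ++ [i] else occs)
    []

-- ===== PORT B =====
-- first loop of B: for j in range(m): roll in t[j], s[j]; recursion on the pattern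
def pvBInit : List Char → List Char → Int × Int × Int → Int × Int × Int
  | [], _, st => st
  | _, [], st => st      -- unreachable: guarded by m ≤ n
  | c :: cs, d :: ds, (w, hp, high) =>
      pvBInit cs ds
        (PySem.Int.mod (w + pvCode d * high) pvM,
         PySem.Int.mod (hp + pvCode c * high) pvM,
         PySem.Int.mod (high * 53) pvM)

-- second loop of B: i-indexed scan with two list pointers lt = t[i:], ht = t[i+m:]
def pvBScan : Nat → Nat → List Char → List Char → Int → Int → Int → Int → List Int → List Int
  | 0, _, _, _, _, _, _, _, occs => occs
  | k+1, i, lt, ht, w, hp, high, low, occs =>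
      let occs' := if w == hp then occs ++ [(i : Int)] else occs
      match ht with
      | [] => occs'          -- i + m = n: last iteration, no roll
      | d :: ds =>
          match lt with
          | [] => occs'      -- unreachable: lt is longer than ht
          | c :: cs =>
              pvBScan k (i+1) cs ds
                (PySem.Int.mod (w - pvCode c * low + pvCode d * high) pvM)
                (PySem.Int.mod (hp * 53) pvM)
                (PySem.Int.mod (high * 53) pvM)
                (PySem.Int.mod (low * 53) pvM)
                occs'

def str_match_alt (s : String) (t : String) : List Int :=
  let sc := s.toList
  let tc := t.toList
  let m := sc.length
  let n := tc.length
  if n < m then []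
  else
    let st := pvBInit sc tc (0, 0, 1)
    pvBScan (n - m + 1) 0 tc (tc.drop m) st.1 st.2.1 st.2.2 1 []

-- ===== PRECONDITION & SPEC =====
-- A raises IndexError whenever the pattern s is empty (its last loop reads
-- p_pow[t_size] past the end of p_pow); Pre_ excludes exactly the empty pattern.
def Pre_str_match (s : String) (t : String) : Prop := s.toList ≠ []
instance (s : String) (t : String) : Decidable (Pre_str_match s t) := by unfold Pre_str_match; infer_instance
def pvWitness_str_match : String × String := ("ab", "cabab")

def Spec_str_match (s : String) (t : String) (out : List Int) : Prop := out = str_match_alt s t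
instance (s : String) (t : String) (out : List Int) : Decidable (Spec_str_match s t out) := by unfold Spec_str_match; infer_instance

-- ===== CLAIM (what is proved, stated in full; the proofs are below) =====
def Claim_equal_str_match : Prop := ∀ (s : String) (t : String), Dom_str_match s t → Pre_str_match s t → Spec_str_match s t (str_match s t)

-- ===== LEMMAS AND PROOFS =====

-- weighted hash sum Σ code(l[j]) * 53^j, in Horner form
def pvWsum : List Char → Int
  | [] => 0
  | c :: cs => pvCode c + 53 * pvWsum cs

-- the common match condition at shift i (the canonical residues both programs compare)
def pvCondF (cs tc : List Char) (m i : Nat) : Bool :=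
  (53 ^ i * pvWsum ((tc.drop i).take m)) % pvM == (pvWsum cs * 53 ^ i) % pvM

theorem pvM_pos : (0 : Int) < pvM := by norm_num [pvM]

theorem pv_mod_eq (a : Int) : PySem.Int.mod a pvM = a % pvM :=
  PySem.Int.mod_eq_emod_of_pos pvM_pos

theorem pv_mod_mod (a : Int) : a % pvM % pvM = a % pvM := Int.emod_emod_of_dvd a dvd_rfl

theorem pv_mul_mod_l (a b : Int) : a % pvM * b % pvM = a * b % pvM := by
  conv_rhs => rw [Int.mul_emod]
  rw [Int.mul_emod (a % pvM), pv_mod_mod]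

theorem pv_mul_mod_r (a b : Int) : a * (b % pvM) % pvM = a * b % pvM := by
  rw [mul_comm a, pv_mul_mod_l, mul_comm]

theorem pv_add_mod_l (a b : Int) : (a % pvM + b) % pvM = (a + b) % pvM := by
  conv_rhs => rw [Int.add_emod]
  rw [Int.add_emod (a % pvM), pv_mod_mod]

theorem pv_add_mul_mod (x y z : Int) : (x + y * (z % pvM)) % pvM = (x + y * z) % pvM := by
  rw [Int.add_emod, pv_mul_mod_r, ← Int.add_emod]

theorem pv_res_sub (a b : Int) : (a % pvM + pvM - b % pvM) % pvM = (a - b) % pvM := by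
  have h1 : a % pvM + pvM - b % pvM = (a % pvM - b % pvM) + pvM := by ring
  rw [h1, Int.add_emod_right, ← Int.sub_emod]

theorem pvPowGo_getD (prev : Int) (k i : Nat) (hi : i < k) (hprev : prev % pvM = prev) :
    (pvPowGo prev k).getD i 0 = prev * 53 ^ i % pvM := by
  induction k generalizing prev i with
  | zero => omega
  | succ k ih =>
      cases i with
      | zero => simpa [pvPowGo] using hprev.symm
      | succ i =>
          have h0 : (pvPowGo prev (k+1)).getD (i+1) 0
              = (pvPowGo (PySem.Int.mod (prev * 53) pvM) k).getD i 0 := rfl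
          rw [h0, ih _ _ (by omega) (by rw [pv_mod_eq]; exact pv_mod_mod _),
            pv_mod_eq, pv_mul_mod_l]
          ring_nf

theorem pvWsum_take_add (l : List Char) (a b : Nat) :
    pvWsum (l.take (a + b)) = pvWsum (l.take a) + 53 ^ a * pvWsum ((l.drop a).take b) := by
  induction a generalizing l with
  | zero => simp [pvWsum]
  | succ a ih =>
      cases l with
      | nil => simp [pvWsum]
      | cons c xs =>
          have h1 : a + 1 + b = (a + b) + 1 := by omega
          rw [h1]
          simp only [List.take_succ_cons, List.drop_succ_cons, pvWsum, ih]
          ring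

theorem pvHGo_getD (p_pow : List Int) (len : Nat)
    (hpow : ∀ r, r < len → p_pow.getD r 0 = 53 ^ r % pvM) :
    ∀ (ds : List Char) (cur : Int) (i j : Nat), i + ds.length ≤ len →
      cur % pvM = cur → j ≤ ds.length →
      (pvHGo p_pow cur i ds).getD j 0 = (cur + 53 ^ i * pvWsum (ds.take j)) % pvM := by
  intro ds
  induction ds with
  | nil =>
      intro cur i j _ hcur hj
      have hj0 : j = 0 := by simpa using hj
      subst hj0
      simp [pvHGo, pvWsum, hcur]
  | cons c cs ih =>
      intro cur i j hlen hcur hj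
      cases j with
      | zero => simp [pvHGo, pvWsum, hcur]
      | succ j =>
          have h0 : (pvHGo p_pow cur i (c :: cs)).getD (j+1) 0
              = (pvHGo p_pow (PySem.Int.mod (cur + pvCode c * p_pow.getD i 0) pvM) (i+1) cs).getD j 0 := rfl
          rw [h0, ih _ _ _ (by simp at hlen ⊢; omega)
            (by rw [pv_mod_eq]; exact pv_mod_mod _) (by simpa using hj)]
          rw [pv_mod_eq, hpow i (by simp at hlen; omega), pv_add_mul_mod, pv_add_mod_l]
          congr 1
          simp only [List.take_succ_cons, pvWsum]
          ring

theorem pvHsGo_eq (p_pow : List Int) (len : Nat)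
    (hpow : ∀ r, r < len → p_pow.getD r 0 = 53 ^ r % pvM) :
    ∀ (cs : List Char) (acc : Int) (i : Nat), i + cs.length ≤ len →
      acc % pvM = acc →
      pvHsGo p_pow acc i cs = (acc + 53 ^ i * pvWsum cs) % pvM := by
  intro cs
  induction cs with
  | nil => intro acc i _ hacc; simpa [pvHsGo, pvWsum] using hacc.symm
  | cons c cs ih =>
      intro acc i hlen hacc
      show pvHsGo p_pow (PySem.Int.mod (acc + pvCode c * p_pow.getD i 0) pvM) (i+1) cs = _
      rw [ih _ _ (by simp at hlen ⊢; omega) (by rw [pv_mod_eq]; exact pv_mod_mod _)]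
      rw [pv_mod_eq, hpow i (by simp at hlen; omega), pv_add_mul_mod, pv_add_mod_l]
      congr 1
      simp only [pvWsum]
      ring

theorem pvBInit_eq :
    ∀ (cs td : List Char) (a b : Int) (i : Nat), cs.length ≤ td.length →
      pvBInit cs td (a % pvM, b % pvM, 53 ^ i % pvM)
        = ((a + 53 ^ i * pvWsum (td.take cs.length)) % pvM,
           (b + 53 ^ i * pvWsum cs) % pvM,
           53 ^ (i + cs.length) % pvM) := by
  intro cs
  induction cs with
  | nil => intro td a b i _; simp [pvBInit, pvWsum]
  | cons c cs ih =>
      intro td a b i hlen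
      cases td with
      | nil => simp at hlen
      | cons d ds =>
          show pvBInit cs ds
              (PySem.Int.mod (a % pvM + pvCode d * (53 ^ i % pvM)) pvM,
               PySem.Int.mod (b % pvM + pvCode c * (53 ^ i % pvM)) pvM,
               PySem.Int.mod (53 ^ i % pvM * 53) pvM) = _
          have e1 : PySem.Int.mod (a % pvM + pvCode d * (53 ^ i % pvM)) pvM
              = (a + pvCode d * 53 ^ i) % pvM := by
            rw [pv_mod_eq, pv_add_mod_l, Int.add_emod, pv_mul_mod_r, ← Int.add_emod]
          have e2 : PySem.Int.mod (b % pvM + pvCode c * (53 ^ i % pvM)) pvM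
              = (b + pvCode c * 53 ^ i) % pvM := by
            rw [pv_mod_eq, pv_add_mod_l, Int.add_emod, pv_mul_mod_r, ← Int.add_emod]
          have e3 : PySem.Int.mod (53 ^ i % pvM * 53) pvM = 53 ^ (i + 1) % pvM := by
            rw [pv_mod_eq, pv_mul_mod_l, ← pow_succ]
          rw [e1, e2, e3, ih ds _ _ (i+1) (by simpa using hlen)]
          simp only [Prod.mk.injEq, List.take_succ_cons, List.length_cons, pvWsum]
          refine ⟨?_, ?_, ?_⟩
          · congr 1; ring
          · congr 1; ring
          · congr 2; omega

theorem pvBScan_eq (cs tc : List Char) (hm : 1 ≤ cs.length) (hmn : cs.length ≤ tc.length) :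
    ∀ (k i : Nat) (occs : List Int), i + k = tc.length - cs.length + 1 →
      pvBScan k i (tc.drop i) (tc.drop (i + cs.length))
        ((53 ^ i * pvWsum ((tc.drop i).take cs.length)) % pvM)
        ((pvWsum cs * 53 ^ i) % pvM)
        (53 ^ (i + cs.length) % pvM)
        (53 ^ i % pvM) occs
      = occs ++ ((List.range' i k).filter (pvCondF cs tc cs.length)).map (fun (j : Nat) => (j : Int)) := by
  intro k
  induction k with
  | zero => intro i occs _; simp [pvBScan]
  | succ k ih =>
      intro i occs hik
      have hi_le : i ≤ tc.length - cs.length := by omega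
      rw [List.range'_succ]
      by_cases hht : tc.length ≤ i + cs.length
      · -- last iteration: ht = [], so k = 0
        have hk0 : k = 0 := by omega
        subst hk0
        have hht' : tc.drop (i + cs.length) = [] := List.drop_eq_nil_of_le hht
        rw [hht']
        show (if ((53 ^ i * pvWsum ((tc.drop i).take cs.length)) % pvM
                == (pvWsum cs * 53 ^ i) % pvM) = true
              then occs ++ [(i : Int)] else occs) = _
        by_cases hc : pvCondF cs tc cs.length i
        · simp [pvCondF] at hc
          simp [pvCondF, hc]
        · simp [pvCondF] at hc
          simp [pvCondF, hc]
      · -- roll: ht = d :: ds, lt = c :: cs'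
        replace hht := Nat.lt_of_not_le hht
        obtain ⟨d, ds, hds⟩ : ∃ d ds, tc.drop (i + cs.length) = d :: ds := by
          cases h : tc.drop (i + cs.length) with
          | nil => exact absurd (List.drop_eq_nil_iff.mp h) (by omega)
          | cons d ds => exact ⟨d, ds, rfl⟩
        obtain ⟨c, cs', hcs⟩ : ∃ c cs', tc.drop i = c :: cs' := by
          cases h : tc.drop i with
          | nil => exact absurd (List.drop_eq_nil_iff.mp h) (by omega)
          | cons c cs' => exact ⟨c, cs', rfl⟩
        have hcs' : cs' = tc.drop (i+1) := by
          rw [← List.tail_drop, hcs]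
          rfl
        have hds' : ds = tc.drop (i + 1 + cs.length) := by
          rw [show i + 1 + cs.length = (i + cs.length) + 1 by omega, ← List.tail_drop, hds]
          rfl
        rw [hds, hcs]
        simp only [pvBScan]
        have hback : List.take cs.length (c :: cs') = List.take cs.length (List.drop i tc) := by
          rw [hcs]
        rw [hback]
        obtain ⟨mm, hmm⟩ : ∃ mm, cs.length = mm + 1 := ⟨cs.length - 1, by omega⟩
        have hwin : 53 ^ i * pvWsum ((tc.drop i).take cs.length)
              - pvCode c * 53 ^ i + pvCode d * 53 ^ (i + cs.length)
            = 53 ^ (i+1) * pvWsum ((tc.drop (i+1)).take cs.length) := by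
          have h1 : (tc.drop i).take cs.length = c :: (cs'.take mm) := by
            rw [hcs, hmm]; rfl
          have h2 : pvWsum ((tc.drop (i+1)).take cs.length)
              = pvWsum ((tc.drop (i+1)).take mm)
                + 53 ^ mm * pvWsum (((tc.drop (i+1)).drop mm).take 1) := by
            rw [hmm, pvWsum_take_add]
          have h3 : (tc.drop (i+1)).drop mm = d :: ds := by
            rw [List.drop_drop, ← hds]
            congr 1
            omega
          rw [h1, h2, h3, ← hcs']
          simp only [pvWsum, List.take_succ_cons, List.take_zero]
          have hp : (53:Int) ^ (i + cs.length) = 53 ^ (i+1) * 53 ^ mm := by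
            rw [← pow_add]; congr 1; omega
          rw [hp]
          ring
        have e1 : PySem.Int.mod ((53 ^ i * pvWsum ((tc.drop i).take cs.length)) % pvM
                    - pvCode c * (53 ^ i % pvM) + pvCode d * (53 ^ (i + cs.length) % pvM)) pvM
            = (53 ^ (i+1) * pvWsum ((tc.drop (i+1)).take cs.length)) % pvM := by
          rw [pv_mod_eq, ← hwin]
          rw [Int.add_emod, Int.sub_emod, pv_mod_mod, pv_mul_mod_r, pv_mul_mod_r,
            ← Int.sub_emod, ← Int.add_emod]
        have e2 : PySem.Int.mod ((pvWsum cs * 53 ^ i) % pvM * 53) pvM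
            = (pvWsum cs * 53 ^ (i+1)) % pvM := by
          rw [pv_mod_eq, pv_mul_mod_l, mul_assoc, ← pow_succ]
        have e3 : PySem.Int.mod (53 ^ (i + cs.length) % pvM * 53) pvM
            = 53 ^ (i + 1 + cs.length) % pvM := by
          rw [pv_mod_eq, pv_mul_mod_l, ← pow_succ]
          congr 2
          omega
        have e4 : PySem.Int.mod (53 ^ i % pvM * 53) pvM = 53 ^ (i+1) % pvM := by
          rw [pv_mod_eq, pv_mul_mod_l, ← pow_succ]
        rw [e1, e2, e3, e4, hcs', hds']
        by_cases hc : pvCondF cs tc cs.length i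
        · simp only [pvCondF] at hc
          rw [if_pos hc, ih (i+1) (occs ++ [(i : Int)]) (by omega)]
          simp [pvCondF, hc]
        · simp only [pvCondF] at hc
          rw [if_neg (by simpa using hc), ih (i+1) occs (by omega)]
          simp [pvCondF, hc]

-- A's port computes the filtered range (pattern nonempty, pattern fits)
theorem str_match_eq_filter (s t : String) (hm : 1 ≤ s.toList.length)
    (hmn : s.toList.length ≤ t.toList.length) :
    str_match s t
      = ((List.range (t.toList.length - s.toList.length + 1)).filter
          (pvCondF s.toList t.toList s.toList.length)).map (fun (j : Nat) => (j : Int)) := by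
  simp only [str_match]
  have hpow : ∀ r, r < t.toList.length →
      (pvPowGo 1 (max s.toList.length t.toList.length)).getD r 0 = 53 ^ r % pvM := by
    intro r hr
    rw [pvPowGo_getD 1 _ r (by omega) (by decide), one_mul]
  have hs_eq : pvHsGo (pvPowGo 1 (max s.toList.length t.toList.length)) 0 0 s.toList
      = pvWsum s.toList % pvM := by
    rw [pvHsGo_eq _ t.toList.length hpow s.toList 0 0 (by omega) (by decide)]
    simp
  have hrange : (((t.toList.length : Int) - (s.toList.length : Int) + 1) - 0).toNat
      = t.toList.length - s.toList.length + 1 := by omega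
  rw [PySem.List.pyRange_one, hrange, List.foldl_map]
  refine Eq.trans (PySem.List.foldl_congr_mem _ _
    (fun occs (k : Nat) =>
      if pvCondF s.toList t.toList s.toList.length k then occs ++ [(k : Int)] else occs)
    _ ?_) (by rw [PySem.List.foldl_append_if, List.nil_append])
  intro acc k hk
  have hk' : k < t.toList.length - s.toList.length + 1 := List.mem_range.mp hk
  simp only [zero_add, Int.toNat_natCast]
  have hh1 : (pvHGo (pvPowGo 1 (max s.toList.length t.toList.length)) 0 0 t.toList).getD
      (k + s.toList.length) 0 = pvWsum (t.toList.take (k + s.toList.length)) % pvM := by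
    rw [pvHGo_getD _ t.toList.length hpow t.toList 0 0 (k + s.toList.length)
      (by omega) (by decide) (by omega)]
    simp
  have hh2 : (pvHGo (pvPowGo 1 (max s.toList.length t.toList.length)) 0 0 t.toList).getD k 0
      = pvWsum (t.toList.take k) % pvM := by
    rw [pvHGo_getD _ t.toList.length hpow t.toList 0 0 k (by omega) (by decide) (by omega)]
    simp
  rw [hh1, hh2, hs_eq, hpow k (by omega)]
  rw [pv_mod_eq, pv_res_sub, pv_mod_eq, pv_mul_mod_l, pv_mul_mod_r]
  have harg : pvWsum (t.toList.take (k + s.toList.length)) - pvWsum (t.toList.take k)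
      = 53 ^ k * pvWsum ((t.toList.drop k).take s.toList.length) := by
    rw [pvWsum_take_add]
    ring
  rw [harg]
  rfl

-- B's port computes the same filtered range
theorem str_match_alt_eq_filter (s t : String) (hm : 1 ≤ s.toList.length)
    (hmn : s.toList.length ≤ t.toList.length) :
    str_match_alt s t
      = ((List.range (t.toList.length - s.toList.length + 1)).filter
          (pvCondF s.toList t.toList s.toList.length)).map (fun (j : Nat) => (j : Int)) := by
  have hnm : ¬ t.toList.length < s.toList.length := by omega
  simp only [str_match_alt]
  rw [if_neg hnm]
  have h0 : ((0 : Int), (0 : Int), (1 : Int))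
      = ((0 : Int) % pvM, (0 : Int) % pvM, (53 : Int) ^ 0 % pvM) := by
    norm_num [pvM]
  rw [h0, pvBInit_eq s.toList t.toList 0 0 0 hmn]
  have hb := pvBScan_eq s.toList t.toList hm hmn (t.toList.length - s.toList.length + 1) 0
    ([]) (by omega)
  simp only [List.drop_zero, pow_zero, one_mul, mul_one, zero_add,
    List.nil_append] at hb ⊢
  rw [List.range_eq_range']
  exact hb

theorem str_match_empty (s t : String) (hnm : t.toList.length < s.toList.length) :
    str_match s t = [] := by
  simp only [str_match]
  rw [PySem.List.pyRange_one_eq_nil (by omega)]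
  rfl

-- ===== VERDICT (by name: the statement is the Claim_ definition above) =====
theorem str_match_spec : Claim_equal_str_match := by
  intro s t _ hpre
  unfold Spec_str_match
  have hm : 1 ≤ s.toList.length := by
    cases h : s.toList with
    | nil => exact absurd h hpre
    | cons a l => simp
  by_cases hmn : t.toList.length < s.toList.length
  · rw [str_match_empty s t hmn]
    simp only [str_match_alt]
    rw [if_pos hmn]
  · replace hmn := Nat.le_of_not_lt hmn
    rw [str_match_eq_filter s t hm hmn, str_match_alt_eq_filter s t hm hmn]
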